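-- pv_equiv track=rewrite | github.com/Joao-mello-ferrari/internet-cross-dependency | src/steps/analysis/helpers.py | sort_countries_by_continent
-- ===== SOURCE A (Python) =====
-- def get_continent_mapping():
--     """
--     Get mapping from country codes to continents.
--
--     Returns:
--         dict mapping country codes to continent names
--     """
--     continent_mapping = {
--         # North America
--         'us': 'North America',
--         'ca': 'North America',
--         'mx': 'North America',
--
--         # Central America (Middle America)
--         'gt': 'Central America',
--         'cr': 'Central America',
--         'do': 'Central America',
--
--         # South America
--         'ar': 'South America',
--         'br': 'South America',
--         'co': 'South America',
--
--         # Europe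
--         'de': 'Europe',
--         'es': 'Europe',
--         'fr': 'Europe',
--         'gb': 'Europe',
--         'it': 'Europe',
--
--         # Asia
--         'id': 'Asia',
--         'in': 'Asia',
--         'jp': 'Asia',
--
--         # Africa
--         'eg': 'Africa',
--         'ng': 'Africa',
--         'za': 'Africa',
--
--         # Oceania
--         'au': 'Oceania',
--         'nz': 'Oceania',
--         'pg': 'Oceania'
--     }
--     return continent_mapping
--
-- def sort_countries_by_continent(country_codes):
--     """
--     Sort country codes by continent, then alphabetically within each continent.
--
--     Args:
--         country_codes: list of country codes
--
--     Returns: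
--         list of country codes sorted by continent
--     """
--     continent_mapping = get_continent_mapping()
--
--     # Define continent order
--     continent_order = ['North America', 'Central America', 'South America', 'Europe', 'Asia', 'Africa', 'Oceania']
--
--     # Group countries by continent
--     countries_by_continent = {}
--     for continent in continent_order:
--         countries_by_continent[continent] = []
--
--     # Add an "Other" category for unmapped countries
--     countries_by_continent['Other'] = []
--
--     for code in country_codes:
--         continent = continent_mapping.get(code, 'Other')
--         countries_by_continent[continent].append(code)
--
--     # Sort countries within each continent alphabetically
--     for continent in countries_by_continent:
--         countries_by_continent[continent].sort()
--
--     # Combine all continents in order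
--     sorted_codes = []
--     for continent in continent_order + ['Other']:
--         sorted_codes.extend(countries_by_continent[continent])
--
--     return sorted_codes
-- ===== SOURCE B (Python) =====
-- def sort_countries_by_continent(country_codes):
--     """One keyed sort on the composite key (continent rank, code); unmapped codes rank last."""
--     rank = {
--         'us': 0, 'ca': 0, 'mx': 0,
--         'gt': 1, 'cr': 1, 'do': 1,
--         'ar': 2, 'br': 2, 'co': 2,
--         'de': 3, 'es': 3, 'fr': 3, 'gb': 3, 'it': 3,
--         'id': 4, 'in': 4, 'jp': 4,
--         'eg': 5, 'ng': 5, 'za': 5,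
--         'au': 6, 'nz': 6, 'pg': 6,
--     }
--     return sorted(country_codes, key=lambda c: (rank.get(c, 7), c))
-- ===== Notes on version B (the rewrite author's own statement) =====
-- stated objective: simpler
-- what changed: Replaced the per-continent bucket dict (group into eight lists, sort each, concatenate in continent order) by a single keyed sort on the composite key (continent rank, code), with one flat code-to-rank table and unmapped codes ranked last.
import Mathlib
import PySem

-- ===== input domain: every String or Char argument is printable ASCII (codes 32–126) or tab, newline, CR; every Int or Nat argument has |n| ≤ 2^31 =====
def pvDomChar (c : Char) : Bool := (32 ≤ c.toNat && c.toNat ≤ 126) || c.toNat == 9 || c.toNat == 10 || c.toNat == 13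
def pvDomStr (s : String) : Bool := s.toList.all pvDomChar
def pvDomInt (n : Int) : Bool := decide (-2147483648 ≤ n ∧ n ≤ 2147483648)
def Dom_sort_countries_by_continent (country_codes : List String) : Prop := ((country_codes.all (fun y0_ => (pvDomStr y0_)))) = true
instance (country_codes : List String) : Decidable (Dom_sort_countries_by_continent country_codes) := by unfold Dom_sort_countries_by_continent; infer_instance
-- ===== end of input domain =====

-- B replaces A's per-continent bucket dict (group into eight lists, sort each,
-- concatenate in continent order) by a single keyed sort on the composite key
-- (continent rank, code) read from one flat code-to-rank table; same result, simpler.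


-- ===== PORT A =====
-- module helper get_continent_mapping(): the literal dict of country code → continent
def get_continent_mapping : PySem.Dict String String :=
  PySem.Dict.ofList
    [("us", "North America"), ("ca", "North America"), ("mx", "North America"),
     ("gt", "Central America"), ("cr", "Central America"), ("do", "Central America"),
     ("ar", "South America"), ("br", "South America"), ("co", "South America"),
     ("de", "Europe"), ("es", "Europe"), ("fr", "Europe"), ("gb", "Europe"), ("it", "Europe"),
     ("id", "Asia"), ("in", "Asia"), ("jp", "Asia"),
     ("eg", "Africa"), ("ng", "Africa"), ("za", "Africa"),
     ("au", "Oceania"), ("nz", "Oceania"), ("pg", "Oceania")]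

-- A's continent_order literal
def pvContinentOrder : List String :=
  ["North America", "Central America", "South America", "Europe", "Asia", "Africa", "Oceania"]

def sort_countries_by_continent (country_codes : List String) : List String :=
  let continent_mapping := get_continent_mapping
  -- for continent in continent_order: countries_by_continent[continent] = []
  let countries_by_continent : PySem.Dict String (List String) :=
    pvContinentOrder.foldl (fun d continent => d.insert continent []) PySem.Dict.empty
  -- countries_by_continent['Other'] = []
  let countries_by_continent := countries_by_continent.insert "Other" []
  -- for code in country_codes: countries_by_continent[mapping.get(code,'Other')].append(code)
  -- (every key the loop touches is already present, so modify's default [] is never used)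
  let countries_by_continent :=
    country_codes.foldl
      (fun d code => d.modify (continent_mapping.getD code "Other") [] (fun l => l ++ [code]))
      countries_by_continent
  -- for continent in countries_by_continent: countries_by_continent[continent].sort()
  let countries_by_continent :=
    PySem.Dict.mk (countries_by_continent.items.map
      (fun kv => (kv.1, PySem.List.sorted kv.2 (fun x => x) false)))
  -- for continent in continent_order + ['Other']: sorted_codes.extend(countries_by_continent[continent])
  (pvContinentOrder ++ ["Other"]).foldl
    (fun sorted_codes continent => sorted_codes ++ countries_by_continent.getD continent []) []

-- ===== PORT B =====
-- Source B's flat code → continent-rank dict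
def pvRankTable : PySem.Dict String Int :=
  PySem.Dict.ofList
    [("us", 0), ("ca", 0), ("mx", 0),
     ("gt", 1), ("cr", 1), ("do", 1),
     ("ar", 2), ("br", 2), ("co", 2),
     ("de", 3), ("es", 3), ("fr", 3), ("gb", 3), ("it", 3),
     ("id", 4), ("in", 4), ("jp", 4),
     ("eg", 5), ("ng", 5), ("za", 5),
     ("au", 6), ("nz", 6), ("pg", 6)]

-- Python's tuple key (rank.get(c, 7), c) compares lexicographically: ported as the
-- Lex (Int × String) order, which is exact for a 2-tuple of int and str.
def sort_countries_by_continent_alt (country_codes : List String) : List String :=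
  let rank := pvRankTable
  PySem.List.sorted country_codes (fun c => toLex (rank.getD c (7 : Int), c)) false

-- ===== PRECONDITION & SPEC =====
def Spec_sort_countries_by_continent (country_codes : List String) (out : List String) : Prop := out = sort_countries_by_continent_alt country_codes
instance (country_codes : List String) (out : List String) : Decidable (Spec_sort_countries_by_continent country_codes out) := by unfold Spec_sort_countries_by_continent; infer_instance

-- ===== CLAIM (what is proved, stated in full; the proofs are below) =====
def Claim_equal_sort_countries_by_continent : Prop := ∀ (country_codes : List String), Dom_sort_countries_by_continent country_codes → Spec_sort_countries_by_continent country_codes (sort_countries_by_continent country_codes)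

-- ===== LEMMAS AND PROOFS =====

-- the categories, the category of a code, the rank of a category, B's sort key
def pvCats : List String := pvContinentOrder ++ ["Other"]

def pvF (code : String) : String := get_continent_mapping.getD code "Other"

-- the rank of a category name: its index in continent_order, 7 for 'Other'/unknown
def pvRk (cat : String) : Int :=
  (PySem.Dict.ofList ((PySem.List.enumerate pvContinentOrder).map (fun p => (p.2, p.1)))).getD
    cat (pvContinentOrder.length : Int)

def pvKey (code : String) : Lex (Int × String) := toLex (pvRk (pvF code), code)

-- B's table agrees with rank-of-category-of-code pointwise
theorem pv_rank_eq (c : String) : pvRankTable.getD c 7 = pvRk (pvF c) := by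
  by_cases hm : c ∈ pvRankTable.keys
  · rw [show pvRankTable.keys =
        ["us", "ca", "mx", "gt", "cr", "do", "ar", "br", "co", "de", "es", "fr", "gb", "it",
         "id", "in", "jp", "eg", "ng", "za", "au", "nz", "pg"] from by decide] at hm
    fin_cases hm <;> decide
  · have h1 : pvRankTable.getD c 7 = 7 :=
      PySem.Dict.getD_of_not_contains _ _
        (by rw [PySem.Dict.contains_eq_decide_mem_keys]; simpa using hm)
    have hm2 : c ∉ get_continent_mapping.keys := by
      rw [show get_continent_mapping.keys = pvRankTable.keys from by decide]; exact hm
    have h2 : pvF c = "Other" := by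
      rw [pvF, PySem.Dict.getD_eq_get?_getD,
        (PySem.Dict.get?_eq_none_iff_not_mem_keys _ _).mpr hm2]
      rfl
    rw [h1, h2]; decide

theorem pv_keyB_eq_key : (fun c => toLex (pvRankTable.getD c (7 : Int), c)) = pvKey := by
  funext c
  simp only [pvKey, pv_rank_eq]

theorem pvKey_injective : Function.Injective pvKey := by
  intro a b h
  have := congrArg (fun k => (ofLex k).2) h
  simpa [pvKey] using this

-- any getD is either the default or one of the dict's values
theorem pv_getD_mem_values {κ ν : Type} [BEq κ] (d : PySem.Dict κ ν) (k : κ) (dflt : ν) :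
    d.getD k dflt = dflt ∨ d.getD k dflt ∈ d.values := by
  simp only [PySem.Dict.getD, PySem.Dict.get?]
  cases hf : d.items.find? (fun p => p.1 == k) with
  | none => left; rfl
  | some p =>
      right
      simp only [Option.map_some, Option.getD_some, PySem.Dict.values]
      exact List.mem_map_of_mem (List.mem_of_find?_eq_some hf)

theorem pvF_mem_cats (code : String) : pvF code ∈ pvCats := by
  rcases pv_getD_mem_values get_continent_mapping code "Other" with h | h
  · rw [pvF, h]; decide
  · rw [pvF]
    have hv : ∀ v ∈ get_continent_mapping.values, v ∈ pvCats := by decide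
    exact hv _ h

-- the initial dict maps every key to []
theorem pv_init_getD (c : String) :
    ((pvContinentOrder.foldl (fun d continent => d.insert continent []) PySem.Dict.empty).insert
        "Other" ([] : List String)).getD c [] = [] := by
  simp only [pvContinentOrder, List.foldl]
  simp only [PySem.Dict.getD_insert]
  split_ifs <;> rfl

-- the grouping loop: each key's bucket is the filter of the codes with that category
theorem pv_group_getD (codes : List String) :
    ∀ (d : PySem.Dict String (List String)) (c : String),
      ((codes.foldl (fun d code => d.modify (pvF code) [] (fun l => l ++ [code])) d).getD c [])
        = d.getD c [] ++ codes.filter (fun x => pvF x == c) := by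
  induction codes with
  | nil => intro d c; simp
  | cons x xs ih =>
      intro d c
      simp only [List.foldl_cons, List.filter_cons]
      rw [ih]
      simp only [PySem.Dict.modify, PySem.Dict.getD_insert]
      by_cases h : pvF x = c
      · simp [h]
      · have hb : (pvF x == c) = false := by simpa using h
        rw [if_neg (fun hc => h hc.symm)]
        simp [hb]

-- sorting every value of a dict, read back through getD (sorted [] = [] covers absent keys)
theorem pv_mapsort_getD (d : PySem.Dict String (List String)) (c : String) :
    (PySem.Dict.mk (d.items.map (fun kv => (kv.1, PySem.List.sorted kv.2 (fun x => x) false)))).getD c []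
      = PySem.List.sorted (d.getD c []) (fun x => x) false := by
  obtain ⟨l⟩ := d
  induction l with
  | nil => rfl
  | cons p rest ih =>
      obtain ⟨k, v⟩ := p
      simp only [List.map_cons, PySem.Dict.getD, PySem.Dict.get?_mk_cons]
      by_cases h : (k == c)
      · simp [h]
      · simp only [h, if_false, Bool.false_eq_true]
        simpa [PySem.Dict.getD] using ih

-- A's result, in closed form: concatenation over the categories of the sorted buckets
theorem pvA_eq_flatMap (codes : List String) :
    sort_countries_by_continent codes
      = pvCats.flatMap
          (fun c => PySem.List.sorted (codes.filter (fun x => pvF x == c)) (fun x => x) false) := by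
  simp only [sort_countries_by_continent]
  rw [PySem.List.foldl_append_eq_flatMap, List.nil_append]
  show pvCats.flatMap _ = _
  apply List.flatMap_congr
  intro c _
  simp only [← pvF.eq_def]
  rw [pv_mapsort_getD, pv_group_getD, pv_init_getD, List.nil_append]

-- pointwise-permutation congruence for flatMap
theorem pv_flatMap_perm {α β : Type} (l : List α) (g h : α → List β)
    (hp : ∀ c ∈ l, (g c).Perm (h c)) : (l.flatMap g).Perm (l.flatMap h) := by
  induction l with
  | nil => simp
  | cons c cs ih =>
      simp only [List.flatMap_cons]
      exact (hp c (by simp)).append (ih (fun d hd => hp d (by simp [hd])))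

-- concatenating the filters over distinct, exhaustive categories is a permutation of the list
theorem pv_perm_flatMap_filter :
    ∀ (cats : List String) (codes : List String), cats.Nodup →
      (∀ x ∈ codes, pvF x ∈ cats) →
      (cats.flatMap (fun c => codes.filter (fun x => pvF x == c))).Perm codes := by
  intro cats
  induction cats with
  | nil =>
      intro codes _ h
      cases codes with
      | nil => simp
      | cons y ys => exact absurd (h y (by simp)) (by simp)
  | cons c cs ih =>
      intro codes hnd h
      rw [List.flatMap_cons]
      have hcs : ∀ c' ∈ cs, codes.filter (fun x => pvF x == c')
          = (codes.filter (fun x => !(pvF x == c))).filter (fun x => pvF x == c') := by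
        intro c' hc'
        rw [List.filter_filter]
        apply List.filter_congr
        intro x _
        by_cases hfx : pvF x = c'
        · have hne : pvF x ≠ c := by
            intro hc
            exact (List.nodup_cons.mp hnd).1 ((hc.symm.trans hfx) ▸ hc')
          simp [hfx]
          exact fun hcc => hne (hfx.trans hcc)
        · simp [hfx]
      have hmap : cs.flatMap (fun c' => codes.filter (fun x => pvF x == c'))
          = cs.flatMap (fun c' =>
              (codes.filter (fun x => !(pvF x == c))).filter (fun x => pvF x == c')) := by
        apply List.flatMap_congr
        exact hcs
      rw [hmap]
      have h2 : ∀ x ∈ codes.filter (fun x => !(pvF x == c)), pvF x ∈ cs := by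
        intro x hx
        have hm := List.mem_filter.mp hx
        have hne : pvF x ≠ c := by simpa using hm.2
        rcases List.mem_cons.mp (h x hm.1) with h1 | h1
        · exact absurd h1 hne
        · exact h1
      have hperm := ih (codes.filter (fun x => !(pvF x == c))) (List.nodup_cons.mp hnd).2 h2
      exact (hperm.append_left (codes.filter (fun x => pvF x == c))).trans
        (List.filter_append_perm _ codes)

theorem pvA_perm (codes : List String) : (sort_countries_by_continent codes).Perm codes := by
  rw [pvA_eq_flatMap]
  refine (pv_flatMap_perm _ _ _ (fun c _ => PySem.List.sorted_perm _ _ _)).trans ?_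
  exact pv_perm_flatMap_filter pvCats codes (by decide) (fun x _ => pvF_mem_cats x)

-- membership in a bucket fixes the category
theorem pv_mem_bucket {codes : List String} {c x : String}
    (hx : x ∈ PySem.List.sorted (codes.filter (fun y => pvF y == c)) (fun y => y) false) :
    pvF x = c := by
  have := (PySem.List.mem_sorted _ _ _ _).mp hx
  simpa using (List.mem_filter.mp this).2

theorem pvA_pairwise (codes : List String) :
    (sort_countries_by_continent codes).Pairwise (fun a b => pvKey a ≤ pvKey b) := by
  rw [pvA_eq_flatMap, List.pairwise_flatMap]
  constructor
  · intro c _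
    refine (PySem.List.sorted_pairwise (codes.filter (fun y => pvF y == c))
      (fun y => y)).imp_of_mem ?_
    intro a b ha hb hab
    have hfa := pv_mem_bucket ha
    have hfb := pv_mem_bucket hb
    rw [Prod.Lex.le_iff]
    right
    constructor
    · simp [pvKey, hfa, hfb]
    · simpa [pvKey] using hab
  · have hrk : pvCats.Pairwise (fun c d => pvRk c < pvRk d) := by decide
    refine hrk.imp ?_
    intro c d hcd x hx y hy
    have hfx := pv_mem_bucket hx
    have hfy := pv_mem_bucket hy
    rw [Prod.Lex.le_iff]
    left
    simpa [pvKey, hfx, hfy] using hcd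

theorem pvB_eq (codes : List String) :
    sort_countries_by_continent_alt codes = PySem.List.sorted codes pvKey false := by
  rw [sort_countries_by_continent_alt, ← pv_keyB_eq_key]

-- ===== VERDICT (by name: the statement is the Claim_ definition above) =====
theorem sort_countries_by_continent_spec : Claim_equal_sort_countries_by_continent := by
  intro codes _
  unfold Spec_sort_countries_by_continent
  rw [pvB_eq]
  exact PySem.List.eq_of_perm_of_pairwise_le_of_injective pvKey pvKey_injective
    ((pvA_perm codes).trans (PySem.List.sorted_perm codes pvKey false).symm)
    (pvA_pairwise codes)
    (PySem.List.sorted_pairwise codes pvKey)
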